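-- pv_equiv track=rewrite | github.com/gillggx/ai-ops-agentic-platform | python_ai_sidecar/agent_builder/prompt.py | _format_block_index
-- ===== SOURCE A (Python) =====
-- from typing import Any
--
-- def _first_sentence(text: str, max_chars: int = 100) -> str:
--     """Extract the leading 'one-liner' from a multi-line description.
--
--     Strategy: trim to first newline-delimited paragraph, then cap at
--     max_chars at a word boundary. Keeps the catalog index dense while
--     staying informative enough that the LLM can decide which block to
--     explain_block().
--     """
--     if not text:
--         return ""
--     head = text.strip().split("\n", 1)[0].strip()
--     if len(head) <= max_chars:
--         return head
--     cut = head[:max_chars].rsplit(" ", 1)[0]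
--     return cut + "…"
--
-- def _format_block_index(catalog: dict[tuple[str, str], dict[str, Any]]) -> str:
--     """One-line summary per block, grouped by category. ~80 chars × 47 ≈ 1K tokens."""
--     by_cat: dict[str, list[tuple[str, dict[str, Any]]]] = {}
--     for (name, _version), spec in catalog.items():
--         by_cat.setdefault(spec.get("category") or "other", []).append((name, spec))
--
--     order = ["source", "transform", "logic", "output", "custom", "other"]
--     lines: list[str] = []
--     for cat in order:
--         items = by_cat.get(cat) or []
--         if not items:
--             continue
--         lines.append(f"\n## {cat.upper()}")
--         for name, spec in sorted(items, key=lambda x: x[0]):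
--             summary = _first_sentence(spec.get("description") or "")
--             lines.append(f"- `{name}` — {summary}")
--     return "\n".join(lines)
-- ===== SOURCE B (Python) =====
-- from typing import Any
--
-- def _first_sentence(text: str, max_chars: int = 100) -> str:
--     if not text:
--         return ""
--     head = text.strip().split("\n", 1)[0].strip()
--     if len(head) <= max_chars:
--         return head
--     cut = head[:max_chars].rsplit(" ", 1)[0]
--     return cut + "…"
--
-- def _format_block_index(catalog: dict[tuple[str, str], dict[str, Any]]) -> str:
--     """One pass + one global sort by (category rank, name), headers on rank change."""
--     order = ["source", "transform", "logic", "output", "custom", "other"]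
--     rank = {c: i for i, c in enumerate(order)}
--     entries = []
--     for (name, _version), spec in catalog.items():
--         cat = spec.get("category") or "other"
--         if cat in rank:
--             entries.append((rank[cat], name, cat, spec))
--     entries.sort(key=lambda e: (e[0], e[1]))
--     out = []
--     prev = None
--     for r, name, cat, spec in entries:
--         if r != prev:
--             out.append(f"\n## {cat.upper()}")
--             prev = r
--         out.append(f"- `{name}` — {_first_sentence(spec.get('description') or '')}")
--     return "\n".join(out)
-- ===== Notes on version B (the rewrite author's own statement) =====
-- stated objective: alternative
-- what changed: Instead of grouping entries into a per-category dict and stable-sorting each of the six category buckets separately, B tags each entry with its category rank in one pass, does a single global stable sort on (rank, name), and emits a header whenever the rank changes.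
import Mathlib
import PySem

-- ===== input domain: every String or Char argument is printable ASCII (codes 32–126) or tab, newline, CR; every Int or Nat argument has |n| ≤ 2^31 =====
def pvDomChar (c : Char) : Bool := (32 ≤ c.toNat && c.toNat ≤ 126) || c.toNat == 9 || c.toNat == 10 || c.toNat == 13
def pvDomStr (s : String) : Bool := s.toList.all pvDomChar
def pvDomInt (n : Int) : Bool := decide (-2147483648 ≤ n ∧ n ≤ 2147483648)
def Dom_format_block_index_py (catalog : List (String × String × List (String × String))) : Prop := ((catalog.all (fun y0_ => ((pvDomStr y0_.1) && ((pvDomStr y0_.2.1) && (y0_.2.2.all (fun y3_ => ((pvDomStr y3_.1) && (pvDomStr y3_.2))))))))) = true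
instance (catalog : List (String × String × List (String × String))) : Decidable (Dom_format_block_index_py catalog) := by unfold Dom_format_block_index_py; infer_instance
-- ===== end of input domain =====

-- B replaces A's per-category dict grouping + six per-category sorts by one tagged pass and a single
-- global stable sort on (category rank, name) with header-on-rank-change emission (objective: alternative).

-- ===== PORT A =====
-- shared helper: exact port of _first_sentence / the f-string pieces both Pythons share verbatim
-- hand port of cs.rsplit(" ", 1)[0]: everything before the LAST space, or all of cs if there is none (exact)
def pvRsplit1Head (cs : List Char) : List Char :=
  if ' ' ∈ cs then (cs.reverse.drop (cs.reverse.idxOf ' ' + 1)).reverse else cs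

def pvFirstSentence (t : List Char) : List Char :=
  if t = [] then []
  else
    -- split("\n", 1) always returns a nonempty list, so [0] is headD (exact)
    let head := PySem.Chars.strip ((PySem.Chars.splitOnMax (PySem.Chars.strip t) ['\n'] 1).headD [])
    if head.length ≤ 100 then head
    else pvRsplit1Head (PySem.List.slice head none (some 100)) ++ ['…']

-- spec.get("category") or "other"   (falsy = None or "")
def pvResCat (spec : List (String × String)) : List Char :=
  match (PySem.Dict.mk spec).get? "category" with
  | none => "other".toList
  | some s => if s.toList = [] then "other".toList else s.toList

-- spec.get("description") or ""
def pvDesc (spec : List (String × String)) : List Char :=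
  match (PySem.Dict.mk spec).get? "description" with
  | none => []
  | some s => s.toList

def pvLine (name : List Char) (spec : List (String × String)) : List Char :=
  "- `".toList ++ name ++ "` — ".toList ++ pvFirstSentence (pvDesc spec)

def pvHeader (cat : List Char) : List Char :=
  "\n## ".toList ++ PySem.Chars.upper cat

def pvOrder : List (List Char) :=
  ["source".toList, "transform".toList, "logic".toList, "output".toList, "custom".toList, "other".toList]

def format_block_index_py (catalog : List (String × String × List (String × String))) : String :=
  -- by_cat.setdefault(cat, []).append((name, spec))  ==  modify cat [] (· ++ [(name, spec)])
  let by_cat : PySem.Dict (List Char) (List (List Char × List (String × String))) :=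
    catalog.foldl (fun d x => d.modify (pvResCat x.2.2) [] (fun g => g ++ [(x.1.toList, x.2.2)])) PySem.Dict.empty
  let lines : List (List Char) := pvOrder.foldl (fun lines cat =>
    let items := by_cat.getD cat []
    if items = [] then lines
    else (lines ++ [pvHeader cat]) ++ (PySem.List.sorted items (fun x => x.1) false).map (fun x => pvLine x.1 x.2)) []
  String.ofList (PySem.Chars.join ['\n'] lines)

-- ===== PORT B =====
def format_block_index_py_alt (catalog : List (String × String × List (String × String))) : String :=
  let rank : PySem.Dict (List Char) Int := PySem.Dict.ofList ((PySem.List.enumerate pvOrder).map (fun p => (p.2, p.1)))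
  let entries : List (Int × List Char × List Char × List (String × String)) :=
    catalog.foldl (fun es x =>
      let cat := pvResCat x.2.2
      if rank.contains cat then es ++ [(rank.getD cat 0, x.1.toList, cat, x.2.2)] else es) []
  let sortedE := PySem.List.sorted2 entries (fun e => e.1) (fun e => e.2.1) false
  let res := sortedE.foldl (fun (st : List (List Char) × Option Int) e =>
    let out := if st.2 ≠ some e.1 then st.1 ++ [pvHeader e.2.2.1] else st.1
    (out ++ [pvLine e.2.1 e.2.2.2], if st.2 ≠ some e.1 then some e.1 else st.2)) ([], none)
  String.ofList (PySem.Chars.join ['\n'] res.1)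

-- ===== PRECONDITION & SPEC =====
def Spec_format_block_index_py (catalog : List (String × String × List (String × String))) (out : String) : Prop := out = format_block_index_py_alt catalog
instance (catalog : List (String × String × List (String × String))) (out : String) : Decidable (Spec_format_block_index_py catalog out) := by unfold Spec_format_block_index_py; infer_instance

-- ===== CLAIM (what is proved, stated in full; the proofs are below) =====
def Claim_equal_format_block_index_py : Prop := ∀ (catalog : List (String × String × List (String × String))), Dom_format_block_index_py catalog → Spec_format_block_index_py catalog (format_block_index_py catalog)

-- ===== LEMMAS AND PROOFS =====

-- abbreviations used only by the proofs
def pvPr (x : String × String × List (String × String)) : List Char × List (String × String) :=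
  (x.1.toList, x.2.2)

def pvG (catalog : List (String × String × List (String × String))) (c : List Char) :
    List (String × String × List (String × String)) :=
  catalog.filter (fun x => pvResCat x.2.2 == c)

def pvS (catalog : List (String × String × List (String × String))) (c : List Char) :
    List (String × String × List (String × String)) :=
  PySem.List.sorted (pvG catalog c) (fun x => x.1.toList) false

def pvSeg (catalog : List (String × String × List (String × String))) (c : List Char) : List (List Char) :=
  if pvS catalog c = [] then []
  else pvHeader c :: (pvS catalog c).map (fun x => pvLine x.1.toList x.2.2)

def pvRankDict : PySem.Dict (List Char) Int :=
  PySem.Dict.mk [("source".toList, 0), ("transform".toList, 1), ("logic".toList, 2),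
                 ("output".toList, 3), ("custom".toList, 4), ("other".toList, 5)]

def pvRankD (c : List Char) : Int := pvRankDict.getD c 0

def pvCat (i : Int) : List Char :=
  if i = 0 then "source".toList else if i = 1 then "transform".toList else if i = 2 then "logic".toList
  else if i = 3 then "output".toList else if i = 4 then "custom".toList else if i = 5 then "other".toList else []

def pvRs : List Int := [0, 1, 2, 3, 4, 5]

def pvTag (x : String × String × List (String × String)) :
    Int × List Char × List Char × List (String × String) :=
  (pvRankD (pvResCat x.2.2), x.1.toList, pvResCat x.2.2, x.2.2)

def pvLineOf (e : Int × List Char × List Char × List (String × String)) : List Char :=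
  pvLine e.2.1 e.2.2.2

def pvStep (st : List (List Char) × Option Int)
    (e : Int × List Char × List Char × List (String × String)) :
    List (List Char) × Option Int :=
  let out := if st.2 ≠ some e.1 then st.1 ++ [pvHeader e.2.2.1] else st.1
  (out ++ [pvLine e.2.1 e.2.2.2], if st.2 ≠ some e.1 then some e.1 else st.2)

-- generic insertBy facts
theorem pv_insertBy_append_left {α : Type} (b : α → α → Bool) (x : α) (l m : List α)
    (h : ∀ y ∈ l, b x y = false) :
    PySem.List.insertBy b x (l ++ m) = l ++ PySem.List.insertBy b x m := by
  induction l with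
  | nil => simp
  | cons z l ih =>
    simp only [List.cons_append, PySem.List.insertBy, h z (by simp)]
    simp only [Bool.false_eq_true, if_false, List.cons.injEq, true_and]
    exact ih (fun y hy => h y (by simp [hy]))

theorem pv_insertBy_append_right {α : Type} (b : α → α → Bool) (x : α) (l m : List α)
    (h : ∀ y ∈ m, b x y = true) :
    PySem.List.insertBy b x (l ++ m) = PySem.List.insertBy b x l ++ m := by
  induction l with
  | nil =>
    cases m with
    | nil => simp
    | cons y m => simp [PySem.List.insertBy, h y (by simp)]
  | cons z l ih =>
    simp only [List.cons_append, PySem.List.insertBy]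
    by_cases hz : b x z = true
    · simp [hz]
    · rw [Bool.not_eq_true] at hz
      simp [hz, ih]

theorem pv_insertBy_congr {α : Type} (b b' : α → α → Bool) (x : α) (l : List α)
    (h : ∀ y ∈ l, b x y = b' x y) :
    PySem.List.insertBy b x l = PySem.List.insertBy b' x l := by
  induction l with
  | nil => rfl
  | cons z l ih =>
    simp only [PySem.List.insertBy, h z (by simp)]
    by_cases hz : b' x z = true
    · simp [hz]
    · rw [Bool.not_eq_true] at hz
      simp [hz, ih (fun y hy => h y (by simp [hy]))]

theorem pv_insertBy_map {α β : Type} (f : α → β) (b : β → β → Bool) (x : α) (l : List α) :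
    PySem.List.insertBy b (f x) (l.map f) = (PySem.List.insertBy (fun a a' => b (f a) (f a')) x l).map f := by
  induction l with
  | nil => rfl
  | cons z l ih =>
    simp only [List.map_cons, PySem.List.insertBy]
    by_cases hz : b (f x) (f z) = true
    · simp [hz]
    · rw [Bool.not_eq_true] at hz
      simp [hz, ih]

-- sorted as a foldl of insertBy (definitional)
theorem pv_sorted_foldl {α κ : Type} [LT κ] [DecidableLT κ] (xs : List α) (k : α → κ) :
    PySem.List.sorted xs k false
      = xs.foldl (fun acc x => PySem.List.insertBy (fun a a' => decide (k a < k a')) x acc) [] := rfl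

theorem pv_sorted2_foldl {α κ : Type} [LT κ] [DecidableLT κ] (xs : List α) (k1 : α → Int) (k2 : α → κ) :
    PySem.List.sorted2 xs k1 k2 false
      = xs.foldl (fun acc x => PySem.List.insertBy
          (fun a a' => decide (k1 a < k1 a') || (!decide (k1 a' < k1 a) && decide (k2 a < k2 a'))) x acc) [] := rfl

-- stable sort commutes with map when the key factors through the map
theorem pv_sorted_map {α β κ : Type} [LT κ] [DecidableLT κ] (f : α → β) (k : β → κ) (l : List α) :
    PySem.List.sorted (l.map f) k false = (PySem.List.sorted l (fun a => k (f a)) false).map f := by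
  have key : ∀ (l : List α) (m : List α),
      (l.map f).foldl (fun acc y => PySem.List.insertBy (fun a a' => decide (k a < k a')) y acc) (m.map f)
        = (l.foldl (fun acc y => PySem.List.insertBy (fun a a' => decide (k (f a) < k (f a'))) y acc) m).map f := by
    intro l
    induction l with
    | nil => intro m; simp
    | cons z l ih =>
      intro m
      simp only [List.map_cons, List.foldl_cons]
      rw [pv_insertBy_map f _ z m, ih]
  simpa using key l []

-- inserting into a rank-blocked list edits only the block of the element's rank
theorem pv_insert_split {α : Type} (k1 : α → Int) (b2 : α → α → Bool) (x : α) :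
    ∀ (rs : List Int) (F : Int → List α), rs.Pairwise (· < ·) →
      (∀ i ∈ rs, ∀ y ∈ F i, k1 y = i) → k1 x ∈ rs →
      PySem.List.insertBy (fun a a' => decide (k1 a < k1 a') || (!decide (k1 a' < k1 a) && b2 a a')) x (rs.flatMap F)
        = rs.flatMap (fun i => if i = k1 x then PySem.List.insertBy b2 x (F i) else F i) := by
  intro rs
  induction rs with
  | nil => intro F _ _ hx; simp at hx
  | cons i rs ih =>
    intro F hp hF hx
    simp only [List.flatMap_cons]
    by_cases hi : i = k1 x
    · subst hi
      rw [pv_insertBy_append_right]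
      · rw [pv_insertBy_congr _ b2]
        · rw [if_pos rfl]
          congr 1
          refine List.flatMap_congr (fun j hj => ?_)
          have hji : k1 x < j := (List.pairwise_cons.mp hp).1 j hj
          rw [if_neg (by omega)]
        · intro y hy
          have := hF (k1 x) (by simp) y hy
          simp [this]
      · intro y hy
        simp only [List.mem_flatMap] at hy
        obtain ⟨j, hj, hyj⟩ := hy
        have hji : k1 x < j := (List.pairwise_cons.mp hp).1 j hj
        have := hF j (by simp [hj]) y hyj
        simp [this, hji]
    · have hxrs : k1 x ∈ rs := by
        rcases List.mem_cons.mp hx with h | h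
        · exact absurd h.symm hi
        · exact h
      have hilt : i < k1 x := (List.pairwise_cons.mp hp).1 _ hxrs
      rw [pv_insertBy_append_left]
      · rw [ih F (List.pairwise_cons.mp hp).2 (fun j hj => hF j (by simp [hj])) hxrs]
        rw [if_neg hi]
      · intro y hy
        have := hF i (by simp) y hy
        simp [this, hilt, Int.not_lt.mpr (le_of_lt hilt)]

-- the single global stable sort on (rank, key) is the concatenation of the per-rank stable sorts
theorem pv_sorted2_split {α κ : Type} [LT κ] [DecidableLT κ] (k1 : α → Int) (k2 : α → κ)
    (rs : List Int) (hrs : rs.Pairwise (· < ·)) :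
    ∀ es : List α, (∀ e ∈ es, k1 e ∈ rs) →
      PySem.List.sorted2 es k1 k2 false
        = rs.flatMap (fun i => PySem.List.sorted (es.filter (fun e => k1 e == i)) k2 false) := by
  intro es
  induction es using List.reverseRecOn with
  | nil => simp [pv_sorted2_foldl, pv_sorted_foldl]
  | append_singleton es x ih =>
    intro h
    rw [pv_sorted2_foldl, List.foldl_append, ← pv_sorted2_foldl]
    simp only [List.foldl_cons, List.foldl_nil]
    rw [ih (fun e he => h e (by simp [he]))]
    rw [pv_insert_split k1 (fun a a' => decide (k2 a < k2 a')) x rs _ hrs]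
    · refine List.flatMap_congr (fun i hi => ?_)
      by_cases hix : i = k1 x
      · rw [if_pos hix]
        subst hix
        have hfx : List.filter (fun e => k1 e == k1 x) [x] = [x] := by simp
        conv_rhs => rw [List.filter_append, hfx, pv_sorted_foldl, List.foldl_append]
        rw [← pv_sorted_foldl]
        simp only [List.foldl_cons, List.foldl_nil]
      · rw [if_neg hix]
        have : (es ++ [x]).filter (fun e => k1 e == i) = es.filter (fun e => k1 e == i) := by
          have : (k1 x == i) = false := by simp [Ne.symm hix]
          simp [List.filter_append, this]
        rw [this]
    · intro i hi y hy
      rw [PySem.List.mem_sorted] at hy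
      exact beq_iff_eq.mp (List.mem_filter.mp hy).2
    · exact h x (by simp)

-- A's grouping dict, characterised
theorem pv_group (c : List Char) :
    ∀ (l : List (String × String × List (String × String)))
      (d : PySem.Dict (List Char) (List (List Char × List (String × String)))),
      (l.foldl (fun d x => d.modify (pvResCat x.2.2) [] (fun g => g ++ [(x.1.toList, x.2.2)])) d).getD c []
        = d.getD c [] ++ (l.filter (fun x => pvResCat x.2.2 == c)).map pvPr := by
  intro l
  induction l with
  | nil => simp
  | cons x l ih =>
    intro d
    simp only [List.foldl_cons, List.filter_cons]
    rw [ih]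
    by_cases hc : c = pvResCat x.2.2
    · rw [PySem.Dict.getD_modify]
      simp [hc, pvPr]
    · rw [PySem.Dict.getD_modify]
      have : (pvResCat x.2.2 == c) = false := by simp [Ne.symm hc]
      simp [hc, this]

-- rank-dict literal facts
theorem pv_rank_dict_eq :
    PySem.Dict.ofList ((PySem.List.enumerate pvOrder).map (fun p => (p.2, p.1))) = pvRankDict := by decide

theorem pv_contains_iff (c : List Char) : pvRankDict.contains c = true ↔ c ∈ pvOrder := by
  simp [pvRankDict, pvOrder]
  tauto

theorem pv_rank_facts (c : List Char) (hc : c ∈ pvOrder) :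
    pvRankD c ∈ pvRs ∧ pvCat (pvRankD c) = c := by
  fin_cases hc <;> decide

theorem pv_rankD_cat (i : Int) (hi : i ∈ pvRs) : pvRankD (pvCat i) = i := by
  fin_cases hi <;> decide

theorem pv_catMem (i : Int) (hi : i ∈ pvRs) : pvCat i ∈ pvOrder := by
  fin_cases hi <;> decide

theorem pv_cond (i : Int) (hi : i ∈ pvRs) (c : List Char) :
    (pvRankDict.contains c && (pvRankD c == i)) = (c == pvCat i) := by
  by_cases hc : c ∈ pvOrder
  · have hf := pv_rank_facts c hc
    have hcon : pvRankDict.contains c = true := (pv_contains_iff c).mpr hc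
    by_cases hr : pvRankD c = i
    · have hce : c = pvCat i := by rw [← hr, hf.2]
      rw [← hce]
      simp [hcon, hr]
    · have hne : c ≠ pvCat i := by
        intro h; apply hr; rw [h, pv_rankD_cat i hi]
      simp [hcon, hr, hne]
  · have hcon : pvRankDict.contains c = false := by
      rw [Bool.eq_false_iff]
      intro h; exact hc ((pv_contains_iff c).mp h)
    have hne : c ≠ pvCat i := fun h => hc (h ▸ pv_catMem i hi)
    simp [hcon, hne]

-- emission: a same-rank block after its first element
theorem pv_emit_rest (i : Int) :
    ∀ (bl : List (Int × List Char × List Char × List (String × String))) (out : List (List Char)),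
      (∀ e ∈ bl, e.1 = i) →
      bl.foldl pvStep (out, some i) = (out ++ bl.map pvLineOf, some i) := by
  intro bl
  induction bl with
  | nil => intro out _; simp
  | cons e bl ih =>
    intro out h
    have he : e.1 = i := h e (by simp)
    simp only [List.foldl_cons]
    have hstep : pvStep (out, some i) e = (out ++ [pvLineOf e], some i) := by
      simp [pvStep, pvLineOf, he]
    rw [hstep, ih (out ++ [pvLineOf e]) (fun y hy => h y (by simp [hy]))]
    simp

theorem pv_emit_block (i : Int) (c : List Char) :
    ∀ (bl : List (Int × List Char × List Char × List (String × String))) (out : List (List Char))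
      (prev : Option Int), bl ≠ [] → (∀ e ∈ bl, e.1 = i ∧ e.2.2.1 = c) → prev ≠ some i →
      bl.foldl pvStep (out, prev) = (out ++ pvHeader c :: bl.map pvLineOf, some i) := by
  intro bl out prev hne h hprev
  cases bl with
  | nil => exact absurd rfl hne
  | cons e bl =>
    have he := h e (by simp)
    simp only [List.foldl_cons]
    have hstep : pvStep (out, prev) e = (out ++ [pvHeader c] ++ [pvLineOf e], some i) := by
      simp [pvStep, pvLineOf, he.1, he.2, hprev]
    rw [hstep, pv_emit_rest i bl _ (fun y hy => (h y (by simp [hy])).1)]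
    simp

theorem pv_emit_blocks :
    ∀ (bs : List (Int × List Char × List (Int × List Char × List Char × List (String × String))))
      (out : List (List Char)) (prev : Option Int),
      (∀ p ∈ bs, ∀ e ∈ p.2.2, e.1 = p.1 ∧ e.2.2.1 = p.2.1) →
      bs.Pairwise (fun p q => p.1 < q.1) →
      (∀ p ∈ bs, ∀ j, prev = some j → j < p.1) →
      ∃ prev', (bs.flatMap (fun p => p.2.2)).foldl pvStep (out, prev)
          = (out ++ bs.flatMap (fun p => if p.2.2 = [] then [] else pvHeader p.2.1 :: p.2.2.map pvLineOf), prev')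
        ∧ (∀ j, prev' = some j → prev = some j ∨ ∃ p ∈ bs, j = p.1) := by
  intro bs
  induction bs with
  | nil => intro out prev _ _ _; exact ⟨prev, by simp, fun j hj => Or.inl hj⟩
  | cons p bs ih =>
    intro out prev h hp hprev
    simp only [List.flatMap_cons, List.foldl_append]
    by_cases hemp : p.2.2 = []
    · obtain ⟨prev', heq, hj⟩ := ih out prev (fun q hq => h q (by simp [hq]))
        (List.pairwise_cons.mp hp).2 (fun q hq => hprev q (by simp [hq]))
      refine ⟨prev', ?_, fun j h' => (hj j h').imp id (fun ⟨q, hq, e⟩ => ⟨q, by simp [hq], e⟩)⟩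
      rw [hemp]
      simpa [hemp] using heq
    · have hpne : prev ≠ some p.1 := by
        intro h'
        have := hprev p (by simp) p.1 h'
        omega
      rw [pv_emit_block p.1 p.2.1 p.2.2 out prev hemp (h p (by simp)) hpne]
      obtain ⟨prev', heq, hj⟩ := ih (out ++ pvHeader p.2.1 :: p.2.2.map pvLineOf) (some p.1)
        (fun q hq => h q (by simp [hq])) (List.pairwise_cons.mp hp).2
        (fun q hq j hjj => by
          have : j = p.1 := by injection hjj.symm
          subst this
          exact (List.pairwise_cons.mp hp).1 q hq)
      refine ⟨prev', ?_, fun j h' => ?_⟩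
      · rw [heq, if_neg hemp]
        simp
      · rcases hj j h' with h'' | ⟨q, hq, e⟩
        · exact Or.inr ⟨p, by simp, by injection h''.symm⟩
        · exact Or.inr ⟨q, by simp [hq], e⟩

theorem pv_foldl_flatMap {α β : Type} (seg : α → List β) :
    ∀ (l : List α) (acc : List β),
      l.foldl (fun a c => a ++ seg c) acc = acc ++ l.flatMap seg := by
  intro l
  induction l with
  | nil => simp
  | cons z l ih => intro acc; simp [ih, List.append_assoc]

-- the two sides, each as pvOrder.flatMap of the same segment function
theorem pv_A_eq (catalog : List (String × String × List (String × String))) :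
    format_block_index_py catalog
      = String.ofList (PySem.Chars.join ['\n'] (pvOrder.flatMap (pvSeg catalog))) := by
  simp only [format_block_index_py]
  congr 1
  have hgrp : ∀ c : List Char,
      (catalog.foldl (fun d x => d.modify (pvResCat x.2.2) [] (fun g => g ++ [(x.1.toList, x.2.2)]))
          PySem.Dict.empty).getD c []
        = (pvG catalog c).map pvPr := by
    intro c
    rw [pv_group c catalog PySem.Dict.empty]
    simp [pvG]
  have hbody : (fun (lines : List (List Char)) (cat : List Char) =>
      if (catalog.foldl (fun d x => d.modify (pvResCat x.2.2) [] (fun g => g ++ [(x.1.toList, x.2.2)]))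
            PySem.Dict.empty).getD cat [] = [] then lines
      else (lines ++ [pvHeader cat]) ++
        (PySem.List.sorted ((catalog.foldl (fun d x => d.modify (pvResCat x.2.2) [] (fun g => g ++ [(x.1.toList, x.2.2)]))
            PySem.Dict.empty).getD cat []) (fun x => x.1) false).map (fun x => pvLine x.1 x.2))
      = fun lines cat => lines ++ pvSeg catalog cat := by
    funext lines cat
    rw [hgrp cat]
    by_cases hc : pvG catalog cat = []
    · rw [if_pos (by simp [hc]), pvSeg]
      rw [if_pos (by simp [pvS, PySem.List.sorted_eq_nil_iff, hc])]
      simp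
    · rw [if_neg (by simp [hc]), pvSeg]
      rw [if_neg (by simp [pvS, PySem.List.sorted_eq_nil_iff, hc])]
      rw [pv_sorted_map pvPr (fun x => x.1) (pvG catalog cat)]
      have : PySem.List.sorted (pvG catalog cat) (fun a => (pvPr a).1) false = pvS catalog cat := rfl
      rw [this, List.map_map]
      simp [pvPr, Function.comp]
  rw [hbody, pv_foldl_flatMap (pvSeg catalog) pvOrder []]
  simp

theorem pv_B_eq (catalog : List (String × String × List (String × String))) :
    format_block_index_py_alt catalog
      = String.ofList (PySem.Chars.join ['\n'] (pvOrder.flatMap (pvSeg catalog))) := by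
  have h0 : format_block_index_py_alt catalog
      = String.ofList (PySem.Chars.join ['\n']
          ((PySem.List.sorted2
              (catalog.foldl (fun es x =>
                if pvRankDict.contains (pvResCat x.2.2) then es ++ [pvTag x] else es) [])
              (fun e => e.1) (fun e => e.2.1) false).foldl pvStep ([], none)).1) := by
    simp only [format_block_index_py_alt, pv_rank_dict_eq]
    rfl
  rw [h0]
  have hent : catalog.foldl (fun es x =>
        if pvRankDict.contains (pvResCat x.2.2) then es ++ [pvTag x] else es) []
      = (catalog.filter (fun x => pvRankDict.contains (pvResCat x.2.2))).map pvTag := by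
    simpa using PySem.List.foldl_append_if (fun x => pvRankDict.contains (pvResCat x.2.2)) pvTag catalog []
  rw [hent]
  have hmem : ∀ e ∈ (catalog.filter (fun x => pvRankDict.contains (pvResCat x.2.2))).map pvTag,
      e.1 ∈ pvRs := by
    intro e he
    obtain ⟨x, hx, rfl⟩ := List.mem_map.mp he
    have hcon : pvRankDict.contains (pvResCat x.2.2) = true := (List.mem_filter.mp hx).2
    exact (pv_rank_facts _ ((pv_contains_iff _).mp hcon)).1
  rw [pv_sorted2_split (fun e : Int × List Char × List Char × List (String × String) => e.1) (fun e => e.2.1) pvRs (by decide) _ hmem]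
  have hblock : ∀ i ∈ pvRs,
      PySem.List.sorted (((catalog.filter (fun x => pvRankDict.contains (pvResCat x.2.2))).map pvTag).filter
          (fun e => e.1 == i)) (fun e => e.2.1) false
        = (pvS catalog (pvCat i)).map pvTag := by
    intro i hi
    have hfil : ((catalog.filter (fun x => pvRankDict.contains (pvResCat x.2.2))).map pvTag).filter
          (fun e => e.1 == i) = (pvG catalog (pvCat i)).map pvTag := by
      rw [List.filter_map, List.filter_filter]
      congr 1
      apply List.filter_congr
      intro x _
      have := pv_cond i hi (pvResCat x.2.2)
      calc (((fun e => e.1 == i) ∘ pvTag) x && pvRankDict.contains (pvResCat x.2.2))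
          = (pvRankDict.contains (pvResCat x.2.2) && (pvRankD (pvResCat x.2.2) == i)) := Bool.and_comm _ _
        _ = (pvResCat x.2.2 == pvCat i) := this
    rw [hfil, pv_sorted_map pvTag (fun e => e.2.1) (pvG catalog (pvCat i))]
    rfl
  rw [List.flatMap_congr hblock]
  have h3 : ∀ p ∈ pvRs.map (fun i => (i, pvCat i, (pvS catalog (pvCat i)).map pvTag)),
      ∀ j, (none : Option Int) = some j → j < p.1 := by
    intro p _ j hj
    exact absurd hj (by simp)
  have h1 : ∀ p ∈ pvRs.map (fun i => (i, pvCat i, (pvS catalog (pvCat i)).map pvTag)),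
      ∀ e ∈ p.2.2, e.1 = p.1 ∧ e.2.2.1 = p.2.1 := by
    intro p hp e he
    obtain ⟨i, hi, rfl⟩ := List.mem_map.mp hp
    obtain ⟨x, hx, rfl⟩ := List.mem_map.mp he
    have hxg : x ∈ pvG catalog (pvCat i) := by
      have := hx
      rw [pvS, PySem.List.mem_sorted] at this
      exact this
    have hcx : pvResCat x.2.2 = pvCat i := beq_iff_eq.mp (List.mem_filter.mp hxg).2
    refine ⟨?_, ?_⟩
    · show pvRankD (pvResCat x.2.2) = i
      rw [hcx]
      exact pv_rankD_cat i hi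
    · exact hcx
  have h2 : (pvRs.map (fun i => (i, pvCat i, (pvS catalog (pvCat i)).map pvTag))).Pairwise
      (fun p q => p.1 < q.1) := by
    rw [List.pairwise_map]
    exact (by decide : List.Pairwise (fun a b : Int => a < b) pvRs)
  obtain ⟨prev', heq, -⟩ := pv_emit_blocks
    (pvRs.map (fun i => (i, pvCat i, (pvS catalog (pvCat i)).map pvTag))) [] none h1 h2 h3
  rw [List.flatMap_map] at heq
  have hflat : pvRs.flatMap
        ((fun p => p.2.2) ∘ (fun i => (i, pvCat i, (pvS catalog (pvCat i)).map pvTag)))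
      = pvRs.flatMap (fun i => (pvS catalog (pvCat i)).map pvTag) := rfl
  rw [show (fun a => (a, pvCat a, (pvS catalog (pvCat a)).map pvTag).2.2)
        = (fun i => (pvS catalog (pvCat i)).map pvTag) from rfl] at heq
  rw [heq]
  simp only [List.nil_append]
  refine congrArg _ (congrArg _ ?_)
  rw [List.flatMap_map]
  trans pvRs.flatMap (fun i => pvSeg catalog (pvCat i))
  · refine List.flatMap_congr (fun i hi => ?_)
    show (if ((pvS catalog (pvCat i)).map pvTag) = [] then ([] : List (List Char))
        else pvHeader (pvCat i) :: ((pvS catalog (pvCat i)).map pvTag).map pvLineOf)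
      = pvSeg catalog (pvCat i)
    by_cases hc : pvS catalog (pvCat i) = []
    · rw [if_pos (by simp [hc]), pvSeg, if_pos hc]
    · rw [if_neg (by simp [hc]), pvSeg, if_neg hc, List.map_map]
      rfl
  · have hmapcat : pvRs.map pvCat = pvOrder := by decide
    rw [← hmapcat, List.flatMap_map]

-- ===== VERDICT (by name: the statement is the Claim_ definition above) =====
theorem format_block_index_py_spec : Claim_equal_format_block_index_py := by
  intro catalog _dom
  show format_block_index_py catalog = format_block_index_py_alt catalog
  rw [pv_A_eq, pv_B_eq]
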